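-- pv_equiv track=rewrite | github.com/EIMI-Institute/CeFloPS | data_processing/voxel_fun.py | get_adjacent_indices
-- ===== SOURCE A (Python) =====
-- def get_adjacent_indices(voxel_index, grid_shape):
--     """
--     Returns 26 neighbouring indices
--
--     :param voxel_index: tuple or list: (i, j, k), 3d index of voxel in grid
--     :param grid_shape: shape of grid: (nx, ny, nz)
--     :return: list of neighbouring indices
--     """
--
--     i, j, k = voxel_index
--     nx, ny, nz = grid_shape
--
--     # list of offsets
--     offsets = [
--         (di, dj, dk)
--         for di in [-1, 0, 1]
--         for dj in [-1, 0, 1]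
--         for dk in [-1, 0, 1]
--         if not (di == 0 and dj == 0 and dk == 0)
--     ]
--
--     neighbors = []
--     for offset in offsets:
--         ni, nj, nk = i + offset[0], j + offset[1], k + offset[2]
--         # check neighbors in grid
--         if (0 <= ni < nx) and (0 <= nj < ny) and (0 <= nk < nz):
--             neighbors.append((ni, nj, nk))
--
--     return neighbors
-- ===== SOURCE B (Python) =====
-- def get_adjacent_indices(voxel_index, grid_shape):
--     i, j, k = voxel_index
--     nx, ny, nz = grid_shape
--     neighbors = []
--     for ni in range(max(0, i - 1), min(nx, i + 2)):
--         for nj in range(max(0, j - 1), min(ny, j + 2)):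
--             for nk in range(max(0, k - 1), min(nz, k + 2)):
--                 if (ni, nj, nk) != (i, j, k):
--                     neighbors.append((ni, nj, nk))
--     return neighbors
-- ===== Notes on version B (the rewrite author's own statement) =====
-- stated objective: simpler
-- what changed: B drops the 26-element offset list and the per-neighbor in-grid bounds test, instead clamping each axis range up front (range(max(0,i-1), min(nx,i+2)) etc.) and iterating the three ranges directly, skipping only the center.
import Mathlib
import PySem

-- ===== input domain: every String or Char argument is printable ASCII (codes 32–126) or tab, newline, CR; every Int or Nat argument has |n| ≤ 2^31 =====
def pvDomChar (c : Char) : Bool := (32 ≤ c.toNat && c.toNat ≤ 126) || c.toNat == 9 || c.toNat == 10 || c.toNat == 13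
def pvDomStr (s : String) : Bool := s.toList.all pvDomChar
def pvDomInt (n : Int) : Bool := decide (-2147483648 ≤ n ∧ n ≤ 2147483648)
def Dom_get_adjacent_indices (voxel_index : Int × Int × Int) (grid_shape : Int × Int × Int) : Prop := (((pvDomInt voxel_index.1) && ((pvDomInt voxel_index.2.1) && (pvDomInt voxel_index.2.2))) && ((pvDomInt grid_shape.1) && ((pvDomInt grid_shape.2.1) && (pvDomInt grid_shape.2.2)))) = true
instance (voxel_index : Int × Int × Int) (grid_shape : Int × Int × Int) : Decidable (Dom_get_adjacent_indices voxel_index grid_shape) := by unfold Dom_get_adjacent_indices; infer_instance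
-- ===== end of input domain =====

-- B replaces A's 26-offset list plus per-neighbor bounds check by three clamped
-- per-axis ranges with only the center excluded (objective: simpler).

-- ===== PORT A =====
def get_adjacent_indices (voxel_index : Int × Int × Int) (grid_shape : Int × Int × Int) : List (Int × Int × Int) :=
  match voxel_index, grid_shape with
  | (i, j, k), (nx, ny, nz) =>
    let offsets : List (Int × Int × Int) :=
      [(-1 : Int), 0, 1].flatMap (fun di =>
        [(-1 : Int), 0, 1].flatMap (fun dj =>
          ([(-1 : Int), 0, 1].filter (fun dk =>
            decide (¬(di = 0 ∧ dj = 0 ∧ dk = 0)))).map (fun dk => (di, dj, dk))))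
    offsets.foldl (fun neighbors offset =>
      let ni := i + offset.1
      let nj := j + offset.2.1
      let nk := k + offset.2.2
      if (0 ≤ ni ∧ ni < nx) ∧ (0 ≤ nj ∧ nj < ny) ∧ (0 ≤ nk ∧ nk < nz) then
        neighbors ++ [(ni, nj, nk)]
      else neighbors) []

-- ===== PORT B =====
def get_adjacent_indices_alt (voxel_index : Int × Int × Int) (grid_shape : Int × Int × Int) : List (Int × Int × Int) :=
  match voxel_index, grid_shape with
  | (i, j, k), (nx, ny, nz) =>
    (PySem.List.pyRange (max 0 (i - 1)) (min nx (i + 2)) 1).foldl (fun neighbors ni =>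
      (PySem.List.pyRange (max 0 (j - 1)) (min ny (j + 2)) 1).foldl (fun neighbors nj =>
        (PySem.List.pyRange (max 0 (k - 1)) (min nz (k + 2)) 1).foldl (fun neighbors nk =>
          if (ni, nj, nk) ≠ (i, j, k) then neighbors ++ [(ni, nj, nk)]
          else neighbors) neighbors) neighbors) []

-- ===== PRECONDITION & SPEC =====
def Spec_get_adjacent_indices (voxel_index : Int × Int × Int) (grid_shape : Int × Int × Int) (out : List (Int × Int × Int)) : Prop := out = get_adjacent_indices_alt voxel_index grid_shape
instance (voxel_index : Int × Int × Int) (grid_shape : Int × Int × Int) (out : List (Int × Int × Int)) : Decidable (Spec_get_adjacent_indices voxel_index grid_shape out) := by unfold Spec_get_adjacent_indices; infer_instance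

-- ===== CLAIM (what is proved, stated in full; the proofs are below) =====
def Claim_equal_get_adjacent_indices : Prop := ∀ (voxel_index : Int × Int × Int) (grid_shape : Int × Int × Int), Dom_get_adjacent_indices voxel_index grid_shape → Spec_get_adjacent_indices voxel_index grid_shape (get_adjacent_indices voxel_index grid_shape)

-- ===== LEMMAS AND PROOFS =====

-- The clamped range equals the bounds-filter of the three candidate coordinates.
theorem pvRange3 (c n : Int) :
    PySem.List.pyRange (max 0 (c - 1)) (min n (c + 2)) 1
      = [c - 1, c, c + 1].filter (fun x => decide (0 ≤ x ∧ x < n)) := by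
  have hnd1 : (PySem.List.pyRange (max 0 (c - 1)) (min n (c + 2)) 1).Nodup :=
    PySem.List.nodup_pyRange_one _ _
  have hnd2 : ([c - 1, c, c + 1].filter (fun x => decide (0 ≤ x ∧ x < n))).Nodup := by
    apply List.Nodup.filter
    simp [List.nodup_cons]
    omega
  have hmem : ∀ x : Int, x ∈ PySem.List.pyRange (max 0 (c - 1)) (min n (c + 2)) 1 ↔
      x ∈ [c - 1, c, c + 1].filter (fun x => decide (0 ≤ x ∧ x < n)) := by
    intro x
    simp [PySem.List.mem_pyRange_one, List.mem_filter]
    omega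
  have hperm : (PySem.List.pyRange (max 0 (c - 1)) (min n (c + 2)) 1).Perm
      ([c - 1, c, c + 1].filter (fun x => decide (0 ≤ x ∧ x < n))) :=
    (List.perm_ext_iff_of_nodup hnd1 hnd2).2 hmem
  refine List.Perm.eq_of_pairwise (le := fun a b : Int => a < b)
    (fun a b _ _ h1 h2 => absurd h2 (by omega))
    (PySem.List.pairwise_lt_pyRange_one _ _) (List.Pairwise.filter _ ?_) hperm
  simp [List.pairwise_cons]

-- flatMap over a list equals flatMap over its filtered list when dropped elements contribute [].
theorem pvFlatMapFilter {α β : Type} (l : List α) (p : α → Bool) (f g : α → List β)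
    (h0 : ∀ x ∈ l, p x = false → f x = [])
    (h1 : ∀ x ∈ l, p x = true → f x = g x) :
    l.flatMap f = (l.filter p).flatMap g := by
  induction l with
  | nil => simp
  | cons a t ih =>
    simp only [List.flatMap_cons, List.filter_cons]
    rcases hp : p a with _ | _
    · rw [h0 a (by simp) hp, ih (fun x hx => h0 x (by simp [hx])) (fun x hx => h1 x (by simp [hx]))]
      simp
    · rw [h1 a (by simp) hp, ih (fun x hx => h0 x (by simp [hx])) (fun x hx => h1 x (by simp [hx]))]
      simp

theorem pvMain (voxel_index grid_shape : Int × Int × Int) :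
    get_adjacent_indices voxel_index grid_shape = get_adjacent_indices_alt voxel_index grid_shape := by
  obtain ⟨i, j, k⟩ := voxel_index
  obtain ⟨nx, ny, nz⟩ := grid_shape
  have h3 : ∀ c : Int, [c - 1, c, c + 1] = [(-1 : Int), 0, 1].map (fun d => c + d) := by
    intro c; simp only [List.map_cons, List.map_nil, List.cons.injEq, and_true]; omega
  simp only [get_adjacent_indices, get_adjacent_indices_alt, pvRange3,
    PySem.List.foldl_append_ite, List.nil_append,
    PySem.List.foldl_append_eq_flatMap, h3,
    List.filter_map, List.flatMap_map, List.map_map, List.filter_flatMap,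
    List.map_flatMap, List.filter_filter, Function.comp_def]
  refine pvFlatMapFilter _ _ _ _ ?_ ?_
  · intro di _ hdi
    simp only [decide_eq_false_iff_not] at hdi
    simp only [List.flatMap_eq_nil_iff, List.map_eq_nil_iff, List.filter_eq_nil_iff,
      Bool.and_eq_true, decide_eq_true_eq]
    intros; omega
  · intro di _ hdi
    simp only [decide_eq_true_eq] at hdi
    refine pvFlatMapFilter _ _ _ _ ?_ ?_
    · intro dj _ hdj
      simp only [decide_eq_false_iff_not] at hdj
      simp only [List.map_eq_nil_iff, List.filter_eq_nil_iff,
        Bool.and_eq_true, decide_eq_true_eq]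
      intros; omega
    · intro dj _ hdj
      simp only [decide_eq_true_eq] at hdj
      refine congrArg _ (List.filter_congr ?_)
      intro dk _
      rw [Bool.eq_iff_iff]
      simp only [Bool.and_eq_true, decide_eq_true_eq, ne_eq, Prod.mk.injEq, not_and]
      constructor
      · intro h
        refine ⟨?_, by omega⟩
        intros; omega
      · intro h; omega

-- ===== VERDICT (by name: the statement is the Claim_ definition above) =====
theorem get_adjacent_indices_spec : Claim_equal_get_adjacent_indices := by
  intro v g _
  unfold Spec_get_adjacent_indices
  exact pvMain v g
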